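-- pv_equiv track=rewrite | github.com/kjustin2016/Valere-OCR | Intelligent Document Design/S32JSONpdf.py | structure_text
-- ===== SOURCE A (Python) =====
-- def structure_text(response):
--     # Extract the text from the Textract response dictionary
--     text = ""
--     blocks = response.get('Blocks', [])
--
--     # Iterate over the blocks to extract text (typically from 'WORD' or 'LINE' blocks)
--     for block in blocks:
--         if block['BlockType'] == 'WORD' or block['BlockType'] == 'LINE':
--             text += block.get('Text', '') + '\n'
--
--     # Split the text into sections based on the '\n' character
--     sections = {}
--     current_section = None
--
--     for line in text.split('\n'):
--         if line.strip() == "":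
--             current_section = None
--         elif line.isupper():
--             current_section = line
--             sections[current_section] = []
--         elif current_section:
--             sections[current_section].append(line)
--         else:
--             current_section = "PARAGRAPH"
--             if current_section not in sections:
--                 sections[current_section] = []
--             sections[current_section].append(line)
--
--     for section, content in sections.items():
--         sections[section] = ' '.join(content).strip()
--
--     return sections, text  # Return both sections and the full text for label extraction
-- ===== SOURCE B (Python) =====
-- def structure_text(response):
--     # One fused pass over the blocks: collect the text pieces and run the
--     # section grouping on each block's lines immediately, keeping each
--     # section's content as an incrementally joined string.
--     parts = []
--     sections = {}
--     current = None
--     for block in response.get('Blocks', []):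
--         if block['BlockType'] in ('WORD', 'LINE'):
--             t = block.get('Text', '')
--             parts.append(t + '\n')
--             for line in t.split('\n'):
--                 if not line.strip():
--                     current = None
--                 elif line.isupper():
--                     current = line
--                     sections[current] = ''
--                 else:
--                     if current is None:
--                         current = 'PARAGRAPH'
--                         sections.setdefault(current, '')
--                     prev = sections[current]
--                     sections[current] = prev + ' ' + line if prev else line
--     return {k: v.strip() for k, v in sections.items()}, ''.join(parts)
-- ===== Notes on version B (the rewrite author's own statement) =====
-- stated objective: alternative
-- what changed: B fuses A's two passes (build the full text, then re-split it and group) into a single walk over the blocks that groups each block's lines immediately, and keeps each section's content as one incrementally joined string instead of a list of lines joined and re-assigned in a final dict pass.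
import Mathlib
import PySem

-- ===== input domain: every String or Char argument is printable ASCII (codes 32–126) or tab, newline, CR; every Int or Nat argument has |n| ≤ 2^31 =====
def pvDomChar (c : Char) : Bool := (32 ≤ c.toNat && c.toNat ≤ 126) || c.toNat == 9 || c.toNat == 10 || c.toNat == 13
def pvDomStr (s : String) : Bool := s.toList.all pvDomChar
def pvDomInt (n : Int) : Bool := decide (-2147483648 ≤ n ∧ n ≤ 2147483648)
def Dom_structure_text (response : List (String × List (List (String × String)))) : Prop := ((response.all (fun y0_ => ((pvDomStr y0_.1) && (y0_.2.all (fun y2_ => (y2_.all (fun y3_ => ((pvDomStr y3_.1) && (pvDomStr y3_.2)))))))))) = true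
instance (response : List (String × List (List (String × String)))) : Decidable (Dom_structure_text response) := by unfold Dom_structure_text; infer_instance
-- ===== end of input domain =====

-- B fuses A's two passes into one walk over the blocks and keeps each section's
-- content as one incrementally joined string instead of a list joined afterwards
-- (objective: alternative decomposition, same asymptotic cost).

-- hand port of Python str.isupper() (no PySem primitive): at least one cased character
-- and no lowercase one; exact on the ASCII domain, where the cased characters are exactly
-- the letters. Used by both ports (both Pythons call the same built-in).
def pyStrIsupper (cs : List Char) : Bool :=
  cs.any PySem.Chars.isalpha && cs.all (fun c => !PySem.Chars.islower c)

-- ===== PORT A =====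
-- body of A's text loop: `if block['BlockType'] == 'WORD' or ... : text += block.get('Text','') + '\n'`
-- (block['BlockType'] raises KeyError when the key is absent; Pre_ excludes those inputs,
-- so getD with a dummy default is exact inside Pre_)
def aTextStep (t : List Char) (b : List (String × String)) : List Char :=
  let bd := PySem.Dict.ofList b
  if bd.getD "BlockType" "" == "WORD" || bd.getD "BlockType" "" == "LINE" then
    t ++ (bd.getD "Text" "").toList ++ ['\n']
  else t

-- body of A's grouping loop over the lines of `text`
-- (state: the sections dict, values = list of content lines, and current_section)
def aStep (st : PySem.Dict String (List (List Char)) × Option String) (line : List Char) :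
    PySem.Dict String (List (List Char)) × Option String :=
  if PySem.Chars.strip line = [] then (st.1, none)
  else if pyStrIsupper line = true then
    (st.1.insert (String.ofList line) [], some (String.ofList line))
  else
    match st.2 with
    | some s =>
      -- Python `elif current_section:` tests truthiness: the empty string falls through
      if s ≠ "" then (st.1.modify s [] (· ++ [line]), some s)
      else
        let d := st.1.setdefault "PARAGRAPH" []
        (d.modify "PARAGRAPH" [] (· ++ [line]), some "PARAGRAPH")
    | none =>
        let d := st.1.setdefault "PARAGRAPH" []
        (d.modify "PARAGRAPH" [] (· ++ [line]), some "PARAGRAPH")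

def structure_text (response : List (String × List (List (String × String)))) : (List (String × String)) × String :=
  let blocks := (PySem.Dict.ofList response).getD "Blocks" []
  let text : List Char := blocks.foldl aTextStep []
  let st := (PySem.Chars.splitOn text ['\n']).foldl aStep (PySem.Dict.empty, none)
  -- Python reassigns every existing key of `sections` in items order (the values change
  -- type from list to str); ported as rebuilding the dict in the same key order
  let final := st.1.items.foldl
    (fun (d : PySem.Dict String String) p =>
      d.insert p.1 (String.ofList (PySem.Chars.strip (PySem.Chars.join [' '] p.2))))
    PySem.Dict.empty
  (final.items, String.ofList text)

-- ===== PORT B =====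
-- body of B's grouping loop (state: sections dict with string values, and current)
def bStep (st : PySem.Dict String (List Char) × Option String) (line : List Char) :
    PySem.Dict String (List Char) × Option String :=
  if PySem.Chars.strip line = [] then (st.1, none)
  else if pyStrIsupper line = true then
    (st.1.insert (String.ofList line) [], some (String.ofList line))
  else
    let key := st.2.getD "PARAGRAPH"
    let d := match st.2 with
      | some _ => st.1
      | none => st.1.setdefault "PARAGRAPH" []
    let prev := d.getD key []
    (d.insert key (if prev = [] then line else prev ++ ' ' :: line), some key)

-- body of B's single block loop: collect the piece and group its lines at once
-- (state: the collected text pieces, and the grouping state)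
def bBlockStep (st : List (List Char) × (PySem.Dict String (List Char) × Option String))
    (b : List (String × String)) :
    List (List Char) × (PySem.Dict String (List Char) × Option String) :=
  let bd := PySem.Dict.ofList b
  if bd.getD "BlockType" "" == "WORD" || bd.getD "BlockType" "" == "LINE" then
    let t := (bd.getD "Text" "").toList
    (st.1 ++ [t ++ ['\n']], (PySem.Chars.splitOn t ['\n']).foldl bStep st.2)
  else st

def structure_text_alt (response : List (String × List (List (String × String)))) : (List (String × String)) × String :=
  let blocks := (PySem.Dict.ofList response).getD "Blocks" []
  let st := blocks.foldl bBlockStep ([], (PySem.Dict.empty, none))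
  (st.2.1.items.map (fun p => (p.1, String.ofList (PySem.Chars.strip p.2))),
   String.ofList (PySem.Chars.join [] st.1))

-- ===== PRECONDITION & SPEC =====
-- Pre_ excludes exactly the inputs where A raises: a block under 'Blocks' without a
-- 'BlockType' key makes block['BlockType'] raise KeyError.
def Pre_structure_text (response : List (String × List (List (String × String)))) : Prop :=
  ∀ b ∈ (PySem.Dict.ofList response).getD "Blocks" [],
    (PySem.Dict.ofList b).contains "BlockType" = true
instance (response : List (String × List (List (String × String)))) : Decidable (Pre_structure_text response) := by unfold Pre_structure_text; infer_instance

def pvWitness_structure_text : (List (String × List (List (String × String)))) :=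
  [("Blocks", [[("BlockType", "LINE"), ("Text", "HEADER ONE")],
               [("BlockType", "WORD"), ("Text", "hello world")],
               [("BlockType", "PAGE")]])]

def Spec_structure_text (response : List (String × List (List (String × String)))) (out : (List (String × String)) × String) : Prop := out = structure_text_alt response
instance (response : List (String × List (List (String × String)))) (out : (List (String × String)) × String) : Decidable (Spec_structure_text response out) := by unfold Spec_structure_text; infer_instance

-- ===== CLAIM (what is proved, stated in full; the proofs are below) =====
def Claim_equal_structure_text : Prop := ∀ (response : List (String × List (List (String × String)))), Dom_structure_text response → Pre_structure_text response → Spec_structure_text response (structure_text response)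

-- ===== LEMMAS AND PROOFS =====

-- proof-side structural model of s.split(c) for a one-character separator
def splitC (c : Char) : List Char → List (List Char)
  | [] => [[]]
  | x :: xs =>
    if x = c then [] :: splitC c xs
    else
      match splitC c xs with
      | [] => [[x]]
      | h :: t => (x :: h) :: t

theorem splitC_ne_nil (c : Char) (l : List Char) : splitC c l ≠ [] := by
  cases l with
  | nil => simp [splitC]
  | cons x xs =>
    simp only [splitC]
    split
    · simp
    · split <;> simp

theorem splitOn_go_single (c : Char) :
    ∀ (fuel : Nat) (l cur : List Char) (hacc : List (List Char)), l.length < fuel →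
      PySem.Chars.splitOn.go [c] fuel l cur hacc =
        hacc.reverse ++ (match splitC c l with
                         | [] => []
                         | h :: t => (cur.reverse ++ h) :: t) := by
  intro fuel
  induction fuel with
  | zero => intro l cur hacc h; omega
  | succ f ih =>
    intro l cur hacc h
    cases l with
    | nil => simp [PySem.Chars.splitOn.go, splitC]
    | cons x xs =>
      by_cases hx : x = c
      · subst hx
        rw [show PySem.Chars.splitOn.go [x] (f+1) (x :: xs) cur hacc =
              PySem.Chars.splitOn.go [x] f (List.drop 1 (x :: xs)) [] (cur.reverse :: hacc) from by
            simp [PySem.Chars.splitOn.go, List.isPrefixOf]]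
        rw [ih _ _ _ (by simp at h ⊢; omega)]
        simp only [List.drop_one, List.tail_cons, splitC, if_pos]
        rcases hs : splitC x xs with _ | ⟨hh, tt⟩
        · exact absurd hs (splitC_ne_nil x xs)
        · simp
      · rw [show PySem.Chars.splitOn.go [c] (f+1) (x :: xs) cur hacc =
              PySem.Chars.splitOn.go [c] f xs (x :: cur) hacc from by
            simp [PySem.Chars.splitOn.go, List.isPrefixOf, Ne.symm hx]]
        rw [ih _ _ _ (by simp at h ⊢; omega)]
        simp only [splitC, if_neg hx]
        rcases hs : splitC c xs with _ | ⟨hh, tt⟩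
        · exact absurd hs (splitC_ne_nil c xs)
        · simp

theorem splitOn_eq_splitC (c : Char) (l : List Char) :
    PySem.Chars.splitOn l [c] = splitC c l := by
  rw [PySem.Chars.splitOn, splitOn_go_single c (l.length+1) l [] [] (by omega)]
  rcases hs : splitC c l with _ | ⟨hh, tt⟩
  · exact absurd hs (splitC_ne_nil c l)
  · simp

theorem splitC_append (c : Char) (a b : List Char) :
    splitC c (a ++ c :: b) = splitC c a ++ splitC c b := by
  induction a with
  | nil => simp [splitC]
  | cons x xs ih =>
    by_cases hx : x = c
    · simp [splitC, hx, ih]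
    · simp only [List.cons_append, splitC, if_neg hx, ih]
      rcases hs : splitC c xs with _ | ⟨hh, tt⟩
      · exact absurd hs (splitC_ne_nil c xs)
      · simp

theorem join_sp_snoc (cnt : List (List Char)) (l : List Char) :
    PySem.Chars.join [' '] (cnt ++ [l]) =
      if cnt = [] then l else PySem.Chars.join [' '] cnt ++ ' ' :: l := by
  induction cnt with
  | nil => simp [PySem.Chars.join, List.intercalate]
  | cons h t ih =>
    cases t with
    | nil => simp [PySem.Chars.join, List.intercalate]
    | cons y ys =>
      simp only [List.cons_append]
      rw [PySem.Chars.join_cons_cons, PySem.Chars.join_cons_cons]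
      simp only [List.cons_append] at ih
      rw [ih]
      simp

theorem join_sp_ne_nil (cnt : List (List Char)) (h : cnt ≠ []) (hne : ∀ x ∈ cnt, x ≠ []) :
    PySem.Chars.join [' '] cnt ≠ [] := by
  cases cnt with
  | nil => simp at h
  | cons x t =>
    cases t with
    | nil => simpa [PySem.Chars.join, List.intercalate] using hne x (by simp)
    | cons y ys => rw [PySem.Chars.join_cons_cons]; simp

theorem join_nil_eq_flatten (ps : List (List Char)) :
    PySem.Chars.join [] ps = ps.flatten := by
  induction ps with
  | nil => simp [PySem.Chars.join, List.intercalate]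
  | cons h t ih =>
    cases t with
    | nil => simp [PySem.Chars.join, List.intercalate]
    | cons y ys => rw [PySem.Chars.join_cons_cons] at *; simp [ih]

-- the relation between A's grouping state and B's: same keys in the same order,
-- B's value = the ' '-join of A's content list, whose lines are all nonempty
def SecRel (a : PySem.Dict String (List (List Char))) (b : PySem.Dict String (List Char)) : Prop :=
  b.items = a.items.map (fun p => (p.1, PySem.Chars.join [' '] p.2)) ∧
  (∀ p ∈ a.items, ∀ x ∈ p.2, x ≠ []) ∧ a.keys.Nodup

def StRel (x : PySem.Dict String (List (List Char)) × Option String)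
    (y : PySem.Dict String (List Char) × Option String) : Prop :=
  x.2 = y.2 ∧ x.2 ≠ some "" ∧ SecRel x.1 y.1

theorem contains_rel {a b} (h : SecRel a b) (k : String) : b.contains k = a.contains k := by
  simp [PySem.Dict.contains, h.1, List.any_map, Function.comp_def]

theorem get?_rel {a b} (h : SecRel a b) (k : String) :
    b.get? k = (a.get? k).map (PySem.Chars.join [' ']) := by
  simp [PySem.Dict.get?, h.1, List.find?_map, Function.comp_def, Option.map_map]

theorem getD_rel {a b} (h : SecRel a b) (k : String) :
    b.getD k [] = PySem.Chars.join [' '] (a.getD k []) := by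
  simp only [PySem.Dict.getD, get?_rel h]
  cases a.get? k <;> simp [PySem.Chars.join, List.intercalate]

theorem insert_nil_rel {a b} (h : SecRel a b) (k : String) :
    SecRel (a.insert k []) (b.insert k []) := by
  obtain ⟨hi, hne, hnd⟩ := h
  refine ⟨?_, ?_, PySem.Dict.nodup_keys_insert a k [] hnd⟩
  · by_cases hc : a.contains k = true
    · rw [PySem.Dict.items_insert_of_contains _ _ (by rw [contains_rel ⟨hi, hne, hnd⟩]; exact hc),
          PySem.Dict.items_insert_of_contains _ _ hc, hi, List.map_map, List.map_map]
      apply List.map_congr_left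
      intro p hp
      by_cases hpk : p.1 = k <;> simp [hpk, PySem.Chars.join, List.intercalate]
    · rw [PySem.Dict.items_insert_of_not_contains _ _ (by rw [contains_rel ⟨hi, hne, hnd⟩]; simpa using hc),
          PySem.Dict.items_insert_of_not_contains _ _ (by simpa using hc), hi]
      simp [PySem.Chars.join, List.intercalate]
  · intro p hp
    rcases (PySem.Dict.mem_items_insert a k [] p).1 hp with h1 | h1
    · subst h1; simp
    · exact hne p h1.1

theorem append_rel {a b} (h : SecRel a b) (k : String) (line : List Char) (hl : line ≠ []) :
    SecRel (a.insert k (a.getD k [] ++ [line]))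
           (b.insert k (if b.getD k [] = [] then line else b.getD k [] ++ ' ' :: line)) := by
  obtain ⟨hi, hne, hnd⟩ := h
  have hg := getD_rel ⟨hi, hne, hnd⟩ k
  have hval : (if b.getD k [] = [] then line else b.getD k [] ++ ' ' :: line) =
      PySem.Chars.join [' '] (a.getD k [] ++ [line]) := by
    rw [join_sp_snoc, hg]
    rcases hak : a.get? k with _ | c
    · simp [PySem.Dict.getD, hak, PySem.Chars.join, List.intercalate]
    · have hcne : ∀ x ∈ c, x ≠ [] := hne (k, c) (PySem.Dict.mem_items_of_get?_eq_some a hak)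
      have hc : a.getD k [] = c := by simp [PySem.Dict.getD, hak]
      rw [hc]
      by_cases hcn : c = []
      · subst hcn; simp [PySem.Chars.join, List.intercalate]
      · rw [if_neg hcn, if_neg (join_sp_ne_nil c hcn hcne)]
  refine ⟨?_, ?_, PySem.Dict.nodup_keys_insert a k _ hnd⟩
  · rw [hval]
    by_cases hc : a.contains k = true
    · rw [PySem.Dict.items_insert_of_contains _ _ (by rw [contains_rel ⟨hi, hne, hnd⟩]; exact hc),
          PySem.Dict.items_insert_of_contains _ _ hc, hi, List.map_map, List.map_map]
      apply List.map_congr_left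
      intro p hp
      by_cases hpk : p.1 = k <;> simp [hpk]
    · rw [PySem.Dict.items_insert_of_not_contains _ _ (by rw [contains_rel ⟨hi, hne, hnd⟩]; simpa using hc),
          PySem.Dict.items_insert_of_not_contains _ _ (by simpa using hc), hi]
      simp
  · intro p hp
    rcases (PySem.Dict.mem_items_insert a k _ p).1 hp with h1 | h1
    · subst h1
      intro x hx
      rcases List.mem_append.1 hx with h2 | h2
      · intro hx0
        rcases hak : a.get? k with _ | c
        · simp [PySem.Dict.getD, hak] at h2
        · have := hne (k, c) (PySem.Dict.mem_items_of_get?_eq_some a hak) x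
          simp [PySem.Dict.getD, hak] at h2
          exact this h2 hx0
      · simp at h2; subst h2; exact hl
    · exact hne p h1.1

theorem setdefault_rel {a b} (h : SecRel a b) (k : String) :
    SecRel (a.setdefault k []) (b.setdefault k []) := by
  by_cases hc : a.contains k = true
  · rw [PySem.Dict.setdefault_of_contains _ _ hc,
        PySem.Dict.setdefault_of_contains _ _ (by rw [contains_rel h]; exact hc)]
    exact h
  · rw [PySem.Dict.setdefault_of_not_contains _ _ (by simpa using hc),
        PySem.Dict.setdefault_of_not_contains _ _ (by rw [contains_rel h]; simpa using hc)]
    exact insert_nil_rel h k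

theorem modify_eq_insert (d : PySem.Dict String (List (List Char))) (k : String)
    (f : List (List Char) → List (List Char)) :
    d.modify k [] f = d.insert k (f (d.getD k [])) := PySem.Dict.ext_iff.mpr rfl

theorem strip_ne_nil_of_ne {line : List Char} (h : ¬ PySem.Chars.strip line = []) : line ≠ [] := by
  intro h0; subst h0; exact h rfl

theorem step_rel (x y) (h : StRel x y) (line : List Char) :
    StRel (aStep x line) (bStep y line) := by
  obtain ⟨da, ca⟩ := x
  obtain ⟨db, cb⟩ := y
  obtain ⟨h1, h2, h3⟩ := h
  simp only at h1 h2 h3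
  subst h1
  by_cases hs : PySem.Chars.strip line = []
  · simp only [aStep, bStep, if_pos hs]
    exact ⟨rfl, by simp, h3⟩
  · have hlne : line ≠ [] := strip_ne_nil_of_ne hs
    by_cases hu : pyStrIsupper line = true
    · simp only [aStep, bStep, if_neg hs, if_pos hu]
      refine ⟨rfl, ?_, insert_nil_rel h3 _⟩
      intro hmk
      simp only [Option.some.injEq] at hmk
      exact hlne (String.ofList_inj.mp (by rw [hmk]))
    · simp only [aStep, bStep, if_neg hs, if_neg hu]
      cases ca with
      | none =>
        simp only [Option.getD_none]
        rw [modify_eq_insert]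
        exact ⟨rfl, by simp, append_rel (setdefault_rel h3 "PARAGRAPH") "PARAGRAPH" line hlne⟩
      | some s =>
        have hsne : s ≠ "" := by intro h0; exact h2 (by rw [h0])
        simp only [Option.getD_some, if_pos hsne]
        rw [modify_eq_insert]
        exact ⟨rfl, by simpa using hsne, append_rel h3 s line hlne⟩

theorem foldl_step_rel (ls : List (List Char)) (x y) (h : StRel x y) :
    StRel (ls.foldl aStep x) (ls.foldl bStep y) := by
  induction ls generalizing x y with
  | nil => exact h
  | cons l t ih => exact ih _ _ (step_rel _ _ h l)

-- the text contributed by one block (proof-side)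
def pvText (b : List (String × String)) : Option (List Char) :=
  if (PySem.Dict.ofList b).getD "BlockType" "" == "WORD"
     || (PySem.Dict.ofList b).getD "BlockType" "" == "LINE" then
    some ((PySem.Dict.ofList b).getD "Text" "").toList
  else none

theorem foldl_aTextStep (blocks : List (List (String × String))) (init : List Char) :
    blocks.foldl aTextStep init =
      init ++ ((blocks.filterMap pvText).map (· ++ ['\n'])).flatten := by
  induction blocks generalizing init with
  | nil => simp
  | cons b bs ih =>
    by_cases hcond : ((PySem.Dict.ofList b).getD "BlockType" "" == "WORD"
        || (PySem.Dict.ofList b).getD "BlockType" "" == "LINE") = true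
    · have hp : pvText b = some ((PySem.Dict.ofList b).getD "Text" "").toList := by
        simp [pvText, hcond]
      simp [aTextStep, hcond, ih, hp, List.append_assoc]
    · have hp : pvText b = none := by simp [pvText, hcond]
      simp [aTextStep, hcond, ih, hp]

theorem foldl_bBlockStep (blocks : List (List (String × String)))
    (P : List (List Char)) (M : PySem.Dict String (List Char) × Option String) :
    blocks.foldl bBlockStep (P, M) =
      (P ++ (blocks.filterMap pvText).map (· ++ ['\n']),
       ((blocks.filterMap pvText).flatMap (fun t => PySem.Chars.splitOn t ['\n'])).foldl bStep M) := by
  induction blocks generalizing P M with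
  | nil => simp
  | cons b bs ih =>
    by_cases hcond : ((PySem.Dict.ofList b).getD "BlockType" "" == "WORD"
        || (PySem.Dict.ofList b).getD "BlockType" "" == "LINE") = true
    · have hp : pvText b = some ((PySem.Dict.ofList b).getD "Text" "").toList := by
        simp [pvText, hcond]
      simp only [List.foldl_cons, List.filterMap_cons, hp, bBlockStep, if_pos hcond, ih,
        List.map_cons, List.flatMap_cons, List.foldl_append, List.append_assoc, List.singleton_append]
    · have hp : pvText b = none := by simp [pvText, hcond]
      simp only [List.foldl_cons, List.filterMap_cons, hp, bBlockStep, if_neg hcond, ih]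

theorem splitC_flatten (ts : List (List Char)) :
    splitC '\n' ((ts.map (· ++ ['\n'])).flatten) = ts.flatMap (splitC '\n') ++ [[]] := by
  induction ts with
  | nil => simp [splitC]
  | cons t rest ih =>
    simp only [List.map_cons, List.flatten_cons, List.flatMap_cons, List.append_assoc,
      List.singleton_append]
    rw [splitC_append, ih]

theorem aStep_nil (st : PySem.Dict String (List (List Char)) × Option String) :
    aStep st [] = (st.1, none) := by
  simp only [aStep, if_pos (show PySem.Chars.strip ([] : List Char) = [] from by decide)]

-- ===== VERDICT (by name: the statement is the Claim_ definition above) =====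
theorem structure_text_spec : Claim_equal_structure_text := by
  intro response hdom hpre
  unfold Spec_structure_text structure_text structure_text_alt
  simp only
  rw [foldl_aTextStep, foldl_bBlockStep]
  simp only [List.nil_append]
  generalize List.filterMap pvText ((PySem.Dict.ofList response).getD "Blocks" []) = ts
  rw [splitOn_eq_splitC, splitC_flatten]
  have hBL : ts.flatMap (fun t => PySem.Chars.splitOn t ['\n']) = ts.flatMap (splitC '\n') := by
    simp only [splitOn_eq_splitC]
  rw [hBL, List.foldl_append]
  simp only [List.foldl_cons, List.foldl_nil]
  rw [aStep_nil]
  have hinit : StRel (PySem.Dict.empty, (none : Option String))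
      (PySem.Dict.empty, (none : Option String)) := by
    refine ⟨rfl, by simp, rfl, ?_, ?_⟩
    · intro p hp; simp [PySem.Dict.empty] at hp
    · exact PySem.Dict.nodup_keys_empty
  set st := List.foldl aStep (PySem.Dict.empty, (none : Option String))
    (ts.flatMap (splitC '\n')) with hst
  set st' := List.foldl bStep (PySem.Dict.empty, (none : Option String))
    (ts.flatMap (splitC '\n')) with hst'
  have hrel : StRel st st' := foldl_step_rel _ _ _ hinit
  obtain ⟨-, -, hi, hne, hnd⟩ := hrel
  refine Prod.ext ?_ ?_
  · simp only
    rw [PySem.Dict.items_foldl_insert_fresh st.1.items (fun p => p.1)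
        (fun p => String.ofList (PySem.Chars.strip (PySem.Chars.join [' '] p.2)))
        PySem.Dict.empty (fun p _ => by simp) (by simpa [PySem.Dict.keys] using hnd), hi]
    simp [PySem.Dict.empty, List.map_map, Function.comp_def]
  · simp only
    rw [join_nil_eq_flatten]
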